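-- pv_equiv track=rewrite | github.com/asepulvede/Parallel-Batch-Processing-Machine | pBPM.py | funObj
-- ===== SOURCE A (Python) =====
-- def funObj(lista,jobs):
--   ter= jobs[lista[0]-1][1]+jobs[lista[0]-1][3]
--   for i in range(1, len(lista)):
--     if ter>=jobs[lista[i]-1][1]:
--       ter=ter+jobs[lista[i]-1][3]
--     else:
--       ter=jobs[lista[i]-1][1]+jobs[lista[i]-1][3]
--   return ter
-- ===== SOURCE B (Python) =====
-- def funObj(lista, jobs):
--     # closed form of the max-plus recurrence: result = max_j (r_j - prefix_j) + total
--     total = 0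
--     best = None
--     for idx in lista:
--         row = jobs[idx - 1]
--         r = row[1]
--         d = r - total
--         if best is None or d > best:
--             best = d
--         total += row[3]
--     return best + total
-- ===== Notes on version B (the rewrite author's own statement) =====
-- stated objective: alternative
-- what changed: Replaces A's conditional reset recurrence ter=max(ter,r)+p with its closed form: one pass accumulating the prefix sum of processing times and the maximum of (release - prefix), returning max + total.
import Mathlib
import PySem

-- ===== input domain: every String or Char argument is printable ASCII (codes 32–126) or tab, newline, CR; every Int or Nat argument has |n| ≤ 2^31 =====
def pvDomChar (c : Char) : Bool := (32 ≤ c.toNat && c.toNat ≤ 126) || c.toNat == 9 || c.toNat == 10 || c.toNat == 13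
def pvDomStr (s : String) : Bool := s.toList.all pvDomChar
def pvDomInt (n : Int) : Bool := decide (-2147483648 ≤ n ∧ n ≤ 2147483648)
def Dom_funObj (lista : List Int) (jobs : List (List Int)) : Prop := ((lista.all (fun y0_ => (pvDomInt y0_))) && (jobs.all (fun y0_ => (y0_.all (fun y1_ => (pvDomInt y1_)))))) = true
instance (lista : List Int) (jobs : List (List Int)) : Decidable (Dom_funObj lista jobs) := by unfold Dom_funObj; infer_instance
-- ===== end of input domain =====

-- B computes A's conditional-reset recurrence by its closed form (max of release minus
-- prefix processing sum, plus the total processing sum); same O(n) cost, different decomposition.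

-- ===== PORT A =====
-- ter = jobs[lista[0]-1][1] + jobs[lista[0]-1][3]; then for each later job:
-- if ter >= r then ter += p else ter = r + p.  (getD 0/[] defaults are unreachable inside Pre_.)
def funObj (lista : List Int) (jobs : List (List Int)) : Int :=
  match lista with
  | [] => 0   -- Python raises IndexError here; excluded by Pre_
  | h :: t =>
    let row0 := (PySem.List.pyGet? jobs (h - 1)).getD []
    let ter0 := (PySem.List.pyGet? row0 1).getD 0 + (PySem.List.pyGet? row0 3).getD 0
    t.foldl (fun ter x =>
      let row := (PySem.List.pyGet? jobs (x - 1)).getD []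
      let r := (PySem.List.pyGet? row 1).getD 0
      let p := (PySem.List.pyGet? row 3).getD 0
      if ter ≥ r then ter + p else r + p) ter0

-- ===== PORT B =====
-- one pass: total = running sum of p's, best = max over seen jobs of (r - total before it);
-- answer = best + total.
def funObj_alt (lista : List Int) (jobs : List (List Int)) : Int :=
  let st := lista.foldl (fun (st : Int × Option Int) x =>
      let row := (PySem.List.pyGet? jobs (x - 1)).getD []
      let r := (PySem.List.pyGet? row 1).getD 0
      let d := r - st.1
      let best := match st.2 with
        | none => some d
        | some b => if d > b then some d else some b
      (st.1 + (PySem.List.pyGet? row 3).getD 0, best)) (0, none)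
  st.2.getD 0 + st.1   -- best is none only for empty lista (Python raises there; outside Pre_)

-- ===== PRECONDITION & SPEC =====
-- Pre_: exactly where Python A returns: lista nonempty, every index lista[i]-1 in Python range
-- (negative wraps allowed) and the selected row has at least 4 entries.
def Pre_funObj (lista : List Int) (jobs : List (List Int)) : Prop :=
  lista ≠ [] ∧ ∀ x ∈ lista,
    (-(jobs.length : Int) ≤ x - 1 ∧ x - 1 < (jobs.length : Int)) ∧
    4 ≤ ((PySem.List.pyGet? jobs (x - 1)).getD []).length
instance (lista : List Int) (jobs : List (List Int)) : Decidable (Pre_funObj lista jobs) := by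
  unfold Pre_funObj; infer_instance

def pvWitness_funObj : List Int × List (List Int) := ([1], [[0, 2, 0, 3]])

def Spec_funObj (lista : List Int) (jobs : List (List Int)) (out : Int) : Prop := out = funObj_alt lista jobs
instance (lista : List Int) (jobs : List (List Int)) (out : Int) : Decidable (Spec_funObj lista jobs out) := by unfold Spec_funObj; infer_instance

-- ===== CLAIM (what is proved, stated in full; the proofs are below) =====
def Claim_equal_funObj : Prop := ∀ (lista : List Int) (jobs : List (List Int)), Dom_funObj lista jobs → Pre_funObj lista jobs → Spec_funObj lista jobs (funObj lista jobs)

-- ===== LEMMAS AND PROOFS =====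

-- Invariant: if ter = b + total, then A's fold over t equals B's fold over t continued
-- from state (total, some b), read out as best + total.
theorem funObj_fold_inv (jobs : List (List Int)) (t : List Int) :
    ∀ (ter total b : Int), ter = b + total →
    (t.foldl (fun ter x =>
      let row := (PySem.List.pyGet? jobs (x - 1)).getD []
      let r := (PySem.List.pyGet? row 1).getD 0
      let p := (PySem.List.pyGet? row 3).getD 0
      if ter ≥ r then ter + p else r + p) ter)
    =
    (let st := t.foldl (fun (st : Int × Option Int) x =>
        let row := (PySem.List.pyGet? jobs (x - 1)).getD []
        let r := (PySem.List.pyGet? row 1).getD 0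
        let d := r - st.1
        let best := match st.2 with
          | none => some d
          | some b => if d > b then some d else some b
        (st.1 + (PySem.List.pyGet? row 3).getD 0, best)) (total, some b)
     st.2.getD 0 + st.1) := by
  induction t with
  | nil => intro ter total b h; simpa using h
  | cons x t ih =>
    intro ter total b h
    simp only [List.foldl_cons]
    set r := (PySem.List.pyGet? ((PySem.List.pyGet? jobs (x - 1)).getD []) 1).getD 0 with hr
    set p := (PySem.List.pyGet? ((PySem.List.pyGet? jobs (x - 1)).getD []) 3).getD 0 with hp
    by_cases hc : ter ≥ r
    · rw [if_pos hc, if_neg (show ¬ r - total > b by omega)]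
      exact ih (ter + p) (total + p) b (by omega)
    · rw [if_neg hc, if_pos (show r - total > b by omega)]
      exact ih (r + p) (total + p) (r - total) (by omega)

-- ===== VERDICT (by name: the statement is the Claim_ definition above) =====
theorem funObj_spec : Claim_equal_funObj := by
  intro lista jobs _ hpre
  unfold Spec_funObj funObj funObj_alt
  obtain ⟨hne, _⟩ := hpre
  match lista with
  | [] => exact absurd rfl hne
  | h :: t =>
    simp only [List.foldl_cons]
    exact funObj_fold_inv jobs t _ _ _ (by ring)
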